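-- pv_equiv track=rewrite | github.com/Claire1940/nioh3 | tools/add_videos_batch.py | get_next_video_for_category
-- ===== SOURCE A (Python) =====
-- VIDEO_ASSIGNMENTS = {
--     # Builds类文章 - 使用build和gameplay相关视频
--     'builds': [
--         'wuHt-X1XxkQ',  # Dual swords gameplay
--         '9emtpyx1GLQ',  # Axe build
--         'L4PcxgkHRNo',  # Samurai build
--         '0CfP4Vvwa_w',  # Kusarigama
--         'u8X6Cq6WaXI',  # Best weapon
--         'PDlDnChNDBg',  # Full gameplay
--     ],
--     # Combat类文章 - 使用战斗技巧视频
--     'combat': [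
--         '0sWmxmLbuFg',  # Ninja style
--         'R0w7YFK5hn4',  # No damage
--         'L4PcxgkHRNo',  # Samurai build
--         'PDlDnChNDBg',  # Full gameplay
--         '17838xuoR_4', # Boss fight
--     ],
--     # Guides类文章 - 使用新手指南和预览视频
--     'guides': [
--         'sRgPERnL_Ic',  # Preview & early thoughts
--         'PDlDnChNDBg',  # Full gameplay
--         'UcbvtJQui-M',  # Walkthrough part 1
--         '17838xuoR_4', # Demo
--     ],
--     # Community类文章 - 使用预览、评测视频
--     'community': [
--         'sRgPERnL_Ic',  # Preview
--         'bL_umw0ScIA',  # Features trailer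
--         'UcbvtJQui-M',  # Walkthrough
--     ],
--     # World类文章 - 使用探索和boss战视频
--     'world': [
--         'PDlDnChNDBg',  # Full gameplay
--         '17838xuoR_4', # Boss fight
--         'UcbvtJQui-M',  # Walkthrough
--     ],
--     # Lore类文章 - 使用故事相关视频
--     'lore': [
--         'PDlDnChNDBg',  # Full gameplay
--         'UcbvtJQui-M',  # Walkthrough
--         'sRgPERnL_Ic',  # Preview
--     ],
--     # News类文章 - 使用预告和新闻视频
--     'news': [
--         'bL_umw0ScIA',  # Features trailer
--         'sRgPERnL_Ic',  # Preview
--         'UcbvtJQui-M',  # Walkthrough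
--     ],
--     # Platforms类文章 - 使用demo和性能测试视频
--     'platforms': [
--         '17838xuoR_4', # Demo
--         'PDlDnChNDBg',  # Full gameplay
--         'sRgPERnL_Ic',  # Preview
--     ],
-- }
--
-- def get_next_video_for_category(category, used_videos, video_metadata):
--     """为指定分类获取下一个可用视频"""
--     videos = VIDEO_ASSIGNMENTS.get(category, VIDEO_ASSIGNMENTS['guides'])
--
--     # 找到使用次数最少的视频
--     min_usage = float('inf')
--     selected_video = None
--
--     for video_id in videos:
--         if video_id in video_metadata:
--             usage_count = used_videos.get(video_id, 0)
--             if usage_count < min_usage: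
--                 min_usage = usage_count
--                 selected_video = video_id
--
--     return selected_video
-- ===== SOURCE B (Python) =====
-- VIDEO_ASSIGNMENTS = {
--     'builds': [
--         'wuHt-X1XxkQ',
--         '9emtpyx1GLQ',
--         'L4PcxgkHRNo',
--         '0CfP4Vvwa_w',
--         'u8X6Cq6WaXI',
--         'PDlDnChNDBg',
--     ],
--     'combat': [
--         '0sWmxmLbuFg',
--         'R0w7YFK5hn4',
--         'L4PcxgkHRNo',
--         'PDlDnChNDBg',
--         '17838xuoR_4',
--     ],
--     'guides': [
--         'sRgPERnL_Ic',
--         'PDlDnChNDBg',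
--         'UcbvtJQui-M',
--         '17838xuoR_4',
--     ],
--     'community': [
--         'sRgPERnL_Ic',
--         'bL_umw0ScIA',
--         'UcbvtJQui-M',
--     ],
--     'world': [
--         'PDlDnChNDBg',
--         '17838xuoR_4',
--         'UcbvtJQui-M',
--     ],
--     'lore': [
--         'PDlDnChNDBg',
--         'UcbvtJQui-M',
--         'sRgPERnL_Ic',
--     ],
--     'news': [
--         'bL_umw0ScIA',
--         'sRgPERnL_Ic',
--         'UcbvtJQui-M',
--     ],
--     'platforms': [
--         '17838xuoR_4',
--         'PDlDnChNDBg',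
--         'sRgPERnL_Ic',
--     ],
-- }
--
--
-- def get_next_video_for_category(category, used_videos, video_metadata):
--     """Filter to available videos, rank them by usage with a stable sort, take the first."""
--     videos = VIDEO_ASSIGNMENTS.get(category, VIDEO_ASSIGNMENTS['guides'])
--     candidates = [v for v in videos if v in video_metadata]
--     ranked = sorted(candidates, key=lambda v: used_videos.get(v, 0))
--     return ranked[0] if ranked else None
-- ===== Notes on version B (the rewrite author's own statement) =====
-- stated objective: alternative
-- what changed: Replaces the manual min-usage tracking loop (sentinel float('inf') plus running selected/min state) with a filter of available candidates, a stable sort by usage count, and taking the first element.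
import Mathlib
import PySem

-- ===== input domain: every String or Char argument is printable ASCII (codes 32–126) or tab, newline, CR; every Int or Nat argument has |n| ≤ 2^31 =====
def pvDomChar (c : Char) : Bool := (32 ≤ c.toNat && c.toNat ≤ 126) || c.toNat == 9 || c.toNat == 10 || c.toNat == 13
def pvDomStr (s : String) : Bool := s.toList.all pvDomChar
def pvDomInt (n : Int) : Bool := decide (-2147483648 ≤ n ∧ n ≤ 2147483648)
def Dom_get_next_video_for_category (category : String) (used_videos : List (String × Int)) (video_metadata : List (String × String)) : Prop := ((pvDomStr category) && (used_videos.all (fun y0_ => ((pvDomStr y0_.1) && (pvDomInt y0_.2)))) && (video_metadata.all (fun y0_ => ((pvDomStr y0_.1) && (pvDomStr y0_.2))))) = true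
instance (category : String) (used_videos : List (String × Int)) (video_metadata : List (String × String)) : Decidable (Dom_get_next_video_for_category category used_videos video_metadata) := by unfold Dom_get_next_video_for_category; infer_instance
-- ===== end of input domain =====

-- B replaces A's manual min-usage tracking loop with filter + stable sort by usage + first element (alternative decomposition, not faster).


-- ===== PORT A =====
-- the module-level constant VIDEO_ASSIGNMENTS (shared by both Pythons)
def pvVideoAssignments : PySem.Dict String (List String) := PySem.Dict.mk [
  ("builds", ["wuHt-X1XxkQ", "9emtpyx1GLQ", "L4PcxgkHRNo", "0CfP4Vvwa_w", "u8X6Cq6WaXI", "PDlDnChNDBg"]),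
  ("combat", ["0sWmxmLbuFg", "R0w7YFK5hn4", "L4PcxgkHRNo", "PDlDnChNDBg", "17838xuoR_4"]),
  ("guides", ["sRgPERnL_Ic", "PDlDnChNDBg", "UcbvtJQui-M", "17838xuoR_4"]),
  ("community", ["sRgPERnL_Ic", "bL_umw0ScIA", "UcbvtJQui-M"]),
  ("world", ["PDlDnChNDBg", "17838xuoR_4", "UcbvtJQui-M"]),
  ("lore", ["PDlDnChNDBg", "UcbvtJQui-M", "sRgPERnL_Ic"]),
  ("news", ["bL_umw0ScIA", "sRgPERnL_Ic", "UcbvtJQui-M"]),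
  ("platforms", ["17838xuoR_4", "PDlDnChNDBg", "sRgPERnL_Ic"])]

-- VIDEO_ASSIGNMENTS['guides'] ('guides' is always present, so the [] default of getD is never used)
def pvGuidesDefault : List String := PySem.Dict.getD pvVideoAssignments "guides" []

-- models `usage_count < min_usage` where min_usage : Option Int, none standing for float('inf')
def pyLtInf (u : Int) (mn : Option Int) : Bool :=
  match mn with | none => true | some m => decide (u < m)

-- port of A: the for-loop tracking (min_usage, selected_video); min_usage = none models float('inf')
def get_next_video_for_category (category : String) (used_videos : List (String × Int)) (video_metadata : List (String × String)) : Option String :=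
  let videos := PySem.Dict.getD pvVideoAssignments category pvGuidesDefault
  let st := videos.foldl (fun (st : Option Int × Option String) video_id =>
      if PySem.Dict.contains (PySem.Dict.mk video_metadata) video_id then
        let usage_count := PySem.Dict.getD (PySem.Dict.mk used_videos) video_id 0
        if pyLtInf usage_count st.1 then (some usage_count, some video_id)
        else st
      else st) (none, none)
  st.2

-- ===== PORT B =====
def get_next_video_for_category_alt (category : String) (used_videos : List (String × Int)) (video_metadata : List (String × String)) : Option String :=
  let videos := PySem.Dict.getD pvVideoAssignments category pvGuidesDefault
  let candidates := videos.filter (fun v => PySem.Dict.contains (PySem.Dict.mk video_metadata) v)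
  let ranked := PySem.List.sorted candidates (fun v => PySem.Dict.getD (PySem.Dict.mk used_videos) v 0)
  ranked.head?

-- ===== PRECONDITION & SPEC =====
def Spec_get_next_video_for_category (category : String) (used_videos : List (String × Int)) (video_metadata : List (String × String)) (out : Option String) : Prop := out = get_next_video_for_category_alt category used_videos video_metadata
instance (category : String) (used_videos : List (String × Int)) (video_metadata : List (String × String)) (out : Option String) : Decidable (Spec_get_next_video_for_category category used_videos video_metadata out) := by unfold Spec_get_next_video_for_category; infer_instance

-- ===== CLAIM (what is proved, stated in full; the proofs are below) =====
def Claim_equal_get_next_video_for_category : Prop := ∀ (category : String) (used_videos : List (String × Int)) (video_metadata : List (String × String)), Dom_get_next_video_for_category category used_videos video_metadata → Spec_get_next_video_for_category category used_videos video_metadata (get_next_video_for_category category used_videos video_metadata)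

-- ===== LEMMAS AND PROOFS =====

-- the head of the insertion-sort fold is the left-to-right strict minimum (ties keep the earlier element)
theorem head_foldl_insertBy {α : Type} (k : α → Int) :
    ∀ (cs : List α) (h : α) (t : List α),
      ∃ t', cs.foldl (fun acc x => PySem.List.insertBy (fun a b => decide (k a < k b)) x acc) (h :: t)
        = (cs.foldl (fun b x => if k x < k b then x else b) h) :: t' := by
  intro cs
  induction cs with
  | nil => intro h t; exact ⟨t, rfl⟩
  | cons x cs ih =>
    intro h t
    by_cases hx : k x < k h
    · simpa [List.foldl_cons, PySem.List.insertBy, hx] using ih x (h :: t)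
    · simpa [List.foldl_cons, PySem.List.insertBy, hx] using
        ih h (PySem.List.insertBy (fun a b => decide (k a < k b)) x t)

-- A's loop from a non-inf state equals the same strict-minimum fold (paired with its key)
theorem foldA_some {α : Type} (k : α → Int) :
    ∀ (cs : List α) (h : α),
      cs.foldl (fun (st : Option Int × Option α) x =>
          if pyLtInf (k x) st.1 then (some (k x), some x)
          else st) (some (k h), some h)
      = (some (k (cs.foldl (fun b x => if k x < k b then x else b) h)),
         some (cs.foldl (fun b x => if k x < k b then x else b) h)) := by
  intro cs
  induction cs with
  | nil => intro h; rfl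
  | cons x cs ih =>
    intro h
    by_cases hx : k x < k h
    · simpa [List.foldl_cons, pyLtInf, hx] using ih x
    · simpa [List.foldl_cons, pyLtInf, hx] using ih h


-- A's filtered strict-min loop equals head-of-stable-sort of the filtered list
theorem main_fold (p : String → Bool) (k : String → Int) (vs : List String) :
    (vs.foldl (fun (st : Option Int × Option String) x =>
        if p x then
          (if pyLtInf (k x) st.1 then (some (k x), some x) else st)
        else st) (none, none)).2
      = (PySem.List.sorted (vs.filter p) k).head? := by
  rw [PySem.List.foldl_if_eq_foldl_filter p
      (fun (st : Option Int × Option String) x =>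
        if pyLtInf (k x) st.1 then (some (k x), some x) else st)]
  rw [PySem.List.sorted_eq_foldl_insertBy]
  cases hcs : vs.filter p with
  | nil => rfl
  | cons h rest =>
    obtain ⟨t', ht'⟩ := head_foldl_insertBy k rest h []
    have h1 : pyLtInf (k h) none = true := rfl
    have h2 : PySem.List.insertBy (fun a b => decide (k a < k b)) h ([] : List String) = [h] := by
      simp [PySem.List.insertBy]
    simp only [List.foldl_cons, h1, if_true, foldA_some k rest h, h2, ht', List.head?_cons]

-- ===== VERDICT (by name: the statement is the Claim_ definition above) =====
theorem get_next_video_for_category_spec : Claim_equal_get_next_video_for_category := by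
  intro category used_videos video_metadata _
  unfold Spec_get_next_video_for_category
  unfold get_next_video_for_category get_next_video_for_category_alt
  exact main_fold (fun v => PySem.Dict.contains (PySem.Dict.mk video_metadata) v)
    (fun v => PySem.Dict.getD (PySem.Dict.mk used_videos) v 0)
    (PySem.Dict.getD pvVideoAssignments category pvGuidesDefault)
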